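-- pv_equiv track=rewrite | github.com/Maymonakh/8-Queens-AI-Project | queensproblem.py | next_states_cost
-- ===== SOURCE A (Python) =====
-- def attacking_queens(state=[]):
--     pairs = set()
--
--     for index_1, value_1 in enumerate(state):
--         for index_2, value_2 in enumerate(state):
--             if index_1 == index_2 or index_1 > index_2:
--                 continue
--             elif value_1 == value_2:  # check rows
--                 pairs.add(((index_1, value_1), (index_2, value_2)))
--             elif abs(index_1 - index_2) == abs(value_1 - value_2):  # check diagonal
--                 pairs.add(((index_1, value_1), (index_2, value_2)))
--
--     return pairs
--
-- def next_states_cost(state=[]):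
--     n = len(state)
--     result = [[-1 for c in range(0, n)] for r in range(0, n)]
--
--     for column in range(0, n):
--         for row in range(0, n):
--             if state[column] != row:
--                 successor = state.copy()
--                 successor[column] = row
--                 result[row][column] = len(attacking_queens(successor))
--
--     return result
-- ===== SOURCE B (Python) =====
-- def next_states_cost(state=[]):
--     # Incremental: total attacking pairs once, then per move adjust only the
--     # moved queen's conflicts (O(n^3) instead of recounting all pairs per move).
--     n = len(state)
--
--     def conf(c, v):
--         # number of queens in other columns attacking a queen at (column c, row v)
--         cnt = 0
--         for j in range(n):
--             if j != c and (state[j] == v or abs(c - j) == abs(v - state[j])):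
--                 cnt += 1
--         return cnt
--
--     total = 0
--     for i in range(n):
--         for j in range(i + 1, n):
--             if state[i] == state[j] or abs(i - j) == abs(state[i] - state[j]):
--                 total += 1
--
--     base = [total - conf(c, state[c]) for c in range(n)]
--     return [[-1 if state[c] == r else base[c] + conf(c, r) for c in range(n)]
--             for r in range(n)]
-- ===== Notes on version B (the rewrite author's own statement) =====
-- stated objective: faster
-- what changed: Instead of rebuilding the full set of attacking pairs for each of the n^2 moves (O(n^2) per move), B counts the attacking pairs of the input once and, for each move, adjusts that total by subtracting the moved queen's current conflicts and adding its conflicts at the new row, each computed in one O(n) scan.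
import Mathlib
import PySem

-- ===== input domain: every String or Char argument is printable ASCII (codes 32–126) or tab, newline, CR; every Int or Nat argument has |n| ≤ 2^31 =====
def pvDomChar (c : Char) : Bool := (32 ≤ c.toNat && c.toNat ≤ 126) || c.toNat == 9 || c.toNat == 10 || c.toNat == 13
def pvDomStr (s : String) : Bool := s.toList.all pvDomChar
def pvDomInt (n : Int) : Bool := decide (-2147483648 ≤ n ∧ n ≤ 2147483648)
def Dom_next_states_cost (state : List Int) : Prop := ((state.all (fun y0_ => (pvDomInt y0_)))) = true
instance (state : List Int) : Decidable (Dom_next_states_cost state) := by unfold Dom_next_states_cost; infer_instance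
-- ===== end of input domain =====

-- B replaces A's per-move full O(n^2) recount of attacking pairs by one global count
-- plus an incremental per-move adjustment of the moved queen's own conflicts (O(n^3) total);
-- measured faster. Equivalence of the RETURN value is proved; neither version mutates its argument.

-- ===== PORT A =====
-- helper attacking_queens: builds the set of attacking pairs ((i1,v1),(i2,v2)), i1 < i2
def pvAQ (state : List Int) : PySem.Set ((Int × Int) × (Int × Int)) :=
  (PySem.List.enumerate state).foldl (fun pairs p1 =>
    (PySem.List.enumerate state).foldl (fun pairs p2 =>
      if p1.1 = p2.1 ∨ p1.1 > p2.1 then pairs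
      else if p1.2 = p2.2 then PySem.Set.add pairs (p1, p2)
      else if |p1.1 - p2.1| = |p1.2 - p2.2| then PySem.Set.add pairs (p1, p2)
      else pairs) pairs) PySem.Set.empty

-- result[row][column] = v ; exact because A only uses 0 ≤ row < len(result), 0 ≤ column
def pvSetMat (m : List (List Int)) (r c : Int) (v : Int) : List (List Int) :=
  m.set r.toNat ((m.getD r.toNat []).set c.toNat v)

def next_states_cost (state : List Int) : List (List Int) :=
  let n : Int := PySem.List.len state
  let result : List (List Int) :=
    (PySem.List.pyRange 0 n).map (fun _ => (PySem.List.pyRange 0 n).map (fun _ => (-1 : Int)))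
  (PySem.List.pyRange 0 n).foldl (fun result column =>
    (PySem.List.pyRange 0 n).foldl (fun result row =>
      if PySem.List.pyGetD state column 0 ≠ row then
        -- successor = state.copy(); successor[column] = row  (0 ≤ column < n, so List.set is exact)
        pvSetMat result row column (PySem.Set.len (pvAQ (state.set column.toNat row)))
      else result) result) result

-- ===== PORT B =====
-- conf(c, v): number of queens of `state` in columns ≠ c attacking a queen at (c, v)
def pvConf (state : List Int) (n c v : Int) : Int :=
  (PySem.List.pyRange 0 n).foldl (fun cnt j =>
    if j ≠ c ∧ (PySem.List.pyGetD state j 0 = v ∨ |c - j| = |v - PySem.List.pyGetD state j 0|)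
    then cnt + 1 else cnt) 0

def next_states_cost_alt (state : List Int) : List (List Int) :=
  let n : Int := PySem.List.len state
  let total : Int :=
    (PySem.List.pyRange 0 n).foldl (fun t i =>
      (PySem.List.pyRange (i + 1) n).foldl (fun t j =>
        if PySem.List.pyGetD state i 0 = PySem.List.pyGetD state j 0 ∨
           |i - j| = |PySem.List.pyGetD state i 0 - PySem.List.pyGetD state j 0|
        then t + 1 else t) t) 0
  let base : List Int :=
    (PySem.List.pyRange 0 n).map (fun c => total - pvConf state n c (PySem.List.pyGetD state c 0))
  (PySem.List.pyRange 0 n).map (fun r =>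
    (PySem.List.pyRange 0 n).map (fun c =>
      if PySem.List.pyGetD state c 0 = r then -1
      else PySem.List.pyGetD base c 0 + pvConf state n c r))

-- ===== PRECONDITION & SPEC =====
def Spec_next_states_cost (state : List Int) (out : List (List Int)) : Prop := out = next_states_cost_alt state
instance (state : List Int) (out : List (List Int)) : Decidable (Spec_next_states_cost state out) := by unfold Spec_next_states_cost; infer_instance

-- ===== CLAIM (what is proved, stated in full; the proofs are below) =====
def Claim_equal_next_states_cost : Prop := ∀ (state : List Int), Dom_next_states_cost state → Spec_next_states_cost state (next_states_cost state)

-- ===== LEMMAS AND PROOFS =====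

-- ---- proof-side counting notions ----

-- queen at (column c, row v) attacks the queen of column j
def pvAtk (t : List Int) (c : ℕ) (v : Int) (j : ℕ) : Bool :=
  t.getD j 0 == v || |(c : Int) - (j : Int)| == |v - t.getD j 0|

-- number of columns j ≠ c whose queen attacks a queen at (c, v)
def pvConfN (t : List Int) (c : ℕ) (v : Int) : ℕ :=
  ∑ j ∈ Finset.range t.length, if j ≠ c ∧ pvAtk t c v j then 1 else 0

-- number of attacking pairs (i, j), i < j
def pvCp (t : List Int) : ℕ :=
  ∑ i ∈ Finset.range t.length, ∑ j ∈ Finset.range t.length,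
    if i < j ∧ pvAtk t i (t.getD i 0) j then 1 else 0

-- attacking pairs avoiding column c
def pvS1 (t : List Int) (c : ℕ) : ℕ :=
  ∑ i ∈ Finset.range t.length, ∑ j ∈ Finset.range t.length,
    if i ≠ c ∧ j ≠ c ∧ i < j ∧ pvAtk t i (t.getD i 0) j then 1 else 0

-- the value A writes into result[r][c]
def pvGval (t : List Int) (c r : ℕ) : Int := PySem.Set.len (pvAQ (t.set c (r : Int)))

-- A's inner/outer loop steps, over Nat indices
def pvStepRow (t : List Int) (cN : ℕ) (M : List (List Int)) (rN : ℕ) : List (List Int) :=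
  if t.getD cN 0 ≠ (rN : Int) then M.set rN ((M.getD rN []).set cN (pvGval t cN rN)) else M

def pvStepCol (t : List Int) (M : List (List Int)) (cN : ℕ) : List (List Int) :=
  (List.range t.length).foldl (pvStepRow t cN) M

-- A's pair-selection predicate in attacking_queens
def pvP (p1 p2 : Int × Int) : Bool :=
  !(p1.1 == p2.1 || p2.1 < p1.1) && (p1.2 == p2.2 || |p1.1 - p2.1| == |p1.2 - p2.2|)

-- ---- generic glue ----

lemma pv_beq_comm (a b : Int) : (a == b) = (b == a) := by
  by_cases h : a = b
  · simp [h]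
  · simp [h, Ne.symm h]

lemma pv_sum_map_range (n : ℕ) (f : ℕ → ℕ) :
    ((List.range n).map f).sum = ∑ i ∈ Finset.range n, f i := by
  induction n with
  | zero => simp
  | succ n ih => simp [List.range_succ, Finset.sum_range_succ, ih]

lemma pv_sum_map_range_int (n : ℕ) (f : ℕ → ℤ) :
    ((List.range n).map f).sum = ∑ i ∈ Finset.range n, f i := by
  induction n with
  | zero => simp
  | succ n ih => simp [List.range_succ, Finset.sum_range_succ, ih]

lemma pv_countP_range (n : ℕ) (p : ℕ → Prop) [DecidablePred p] :
    (List.range n).countP (fun j => decide (p j)) = ∑ j ∈ Finset.range n, if p j then 1 else 0 := by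
  induction n with
  | zero => simp
  | succ n ih =>
    rw [List.range_succ, List.countP_append, ih, Finset.sum_range_succ]
    simp [List.countP_cons]

lemma pv_foldl_add_append {α : Type} [BEq α] [LawfulBEq α] (l acc : List α)
    (h : (acc ++ l).Nodup) : l.foldl PySem.Set.add acc = acc ++ l := by
  induction l generalizing acc with
  | nil => simp
  | cons x l ih =>
    have hd := (List.nodup_append.mp h).2.2
    have hx : x ∉ acc := fun hmem => hd x hmem x (by simp) rfl
    have h1 : PySem.Set.add acc x = acc ++ [x] := PySem.Set.add_of_not_mem hx
    have h2 : ((acc ++ [x]) ++ l).Nodup := by simpa using h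
    simp only [List.foldl_cons, h1, ih _ h2, List.append_assoc, List.singleton_append]

lemma pv_mat_ext (X Y : List (List Int)) (n : ℕ)
    (hx : X.length = n) (hy : Y.length = n)
    (hxr : ∀ row ∈ X, row.length = n) (hyr : ∀ row ∈ Y, row.length = n)
    (h : ∀ r < n, ∀ c < n, (X.getD r []).getD c 0 = (Y.getD r []).getD c 0) : X = Y := by
  apply List.ext_getElem (by omega)
  intro r h1 h2
  apply List.ext_getElem
  · rw [hxr _ (List.getElem_mem h1), hyr _ (List.getElem_mem h2)]
  · intro c h3 h4
    have hr : r < n := by omega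
    have hc : c < n := by rw [hxr _ (List.getElem_mem h1)] at h3; exact h3
    have e1 : X[r] = X.getD r [] := by simp [List.getD_eq_getElem?_getD, List.getElem?_eq_getElem h1]
    have e2 : Y[r] = Y.getD r [] := by simp [List.getD_eq_getElem?_getD, List.getElem?_eq_getElem h2]
    have e3 : X[r][c] = (X[r]).getD c 0 := by
      simp [List.getD_eq_getElem?_getD, List.getElem?_eq_getElem h3]
    have e4 : Y[r][c] = (Y[r]).getD c 0 := by
      simp [List.getD_eq_getElem?_getD, List.getElem?_eq_getElem h4]
    rw [e3, e4, e1, e2]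
    exact h r hr c hc

-- ---- A's attacking_queens as a flat list of pairs ----

lemma pv_aq_outer (E : List (Int × Int)) (hE : E.Pairwise (fun p q => p.1 < q.1)) :
    ∀ (l : List (Int × Int)) (acc : List ((Int × Int) × (Int × Int))),
    l.Pairwise (fun p q => p.1 < q.1) →
    (∀ q ∈ acc, ∀ p ∈ l, q.1.1 < p.1) →
    acc.Nodup →
    l.foldl (fun pairs p1 => ((E.filter (pvP p1)).map (fun p2 => (p1, p2))).foldl PySem.Set.add pairs) acc
      = acc ++ l.flatMap (fun p1 => (E.filter (pvP p1)).map (fun p2 => (p1, p2))) := by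
  intro l
  induction l with
  | nil => intro acc _ _ _; simp
  | cons a l ih =>
    intro acc hl hacc hnd
    have hEnd : E.Nodup := hE.imp (fun {p q} h => by intro e; subst e; exact lt_irrefl _ h)
    have hinj : Function.Injective (fun (p2 : Int × Int) => (a, p2)) :=
      fun x y hxy => congrArg Prod.snd hxy
    have hL1nd : ((E.filter (pvP a)).map (fun p2 => (a, p2))).Nodup :=
      (hEnd.filter _).map hinj
    have hdisj : ∀ q ∈ acc, ∀ b ∈ (E.filter (pvP a)).map (fun p2 => (a, p2)), q ≠ b := by
      intro q hq b hb heq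
      obtain ⟨p2, _, rfl⟩ := List.mem_map.mp hb
      have h := hacc _ hq a (by simp)
      rw [heq] at h
      exact lt_irrefl _ h
    have happ : (acc ++ (E.filter (pvP a)).map (fun p2 => (a, p2))).Nodup :=
      List.nodup_append.mpr ⟨hnd, hL1nd, hdisj⟩
    have htl := (List.pairwise_cons.mp hl).2
    have hhd := (List.pairwise_cons.mp hl).1
    rw [List.foldl_cons, pv_foldl_add_append _ acc happ,
        ih _ htl ?_ happ, List.flatMap_cons, List.append_assoc]
    intro q hq p hp
    rcases List.mem_append.mp hq with hq1 | hq2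
    · exact hacc _ hq1 p (List.mem_cons_of_mem _ hp)
    · obtain ⟨p2, _, rfl⟩ := List.mem_map.mp hq2
      exact hhd p hp

lemma pvAQ_eq_flatMap (t : List Int) :
    pvAQ t = (PySem.List.enumerate t).flatMap
      (fun p1 => ((PySem.List.enumerate t).filter (pvP p1)).map (fun p2 => (p1, p2))) := by
  unfold pvAQ
  have hcongr : ∀ (pairs : PySem.Set ((Int × Int) × (Int × Int))),
      ∀ p1 ∈ PySem.List.enumerate t (0 : Int),
      (PySem.List.enumerate t).foldl (fun pairs p2 =>
        if p1.1 = p2.1 ∨ p1.1 > p2.1 then pairs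
        else if p1.2 = p2.2 then PySem.Set.add pairs (p1, p2)
        else if |p1.1 - p2.1| = |p1.2 - p2.2| then PySem.Set.add pairs (p1, p2)
        else pairs) pairs
      = (((PySem.List.enumerate t).filter (pvP p1)).map (fun p2 => (p1, p2))).foldl PySem.Set.add pairs := by
    intro pairs p1 _
    have h1 : (PySem.List.enumerate t).foldl (fun pairs p2 =>
        if p1.1 = p2.1 ∨ p1.1 > p2.1 then pairs
        else if p1.2 = p2.2 then PySem.Set.add pairs (p1, p2)
        else if |p1.1 - p2.1| = |p1.2 - p2.2| then PySem.Set.add pairs (p1, p2)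
        else pairs) pairs
        = (PySem.List.enumerate t).foldl (fun pairs p2 =>
            if pvP p1 p2 then PySem.Set.add pairs (p1, p2) else pairs) pairs := by
      apply PySem.List.foldl_congr_mem
      intro acc p2 _
      by_cases hA1 : p1.1 = p2.1 <;> by_cases hA2 : p2.1 < p1.1 <;>
        by_cases hB : p1.2 = p2.2 <;> by_cases hC : |p1.1 - p2.1| = |p1.2 - p2.2| <;>
        simp [pvP, hA1, hA2, hB, hC, gt_iff_lt]
    rw [h1, PySem.List.foldl_if_eq_foldl_filter (p := pvP p1)
          (f := fun acc p2 => PySem.Set.add acc (p1, p2)),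
        ← List.foldl_map (f := fun p2 => ((p1 : Int × Int), p2))]
  have h0 : (PySem.Set.empty : PySem.Set ((Int × Int) × (Int × Int)))
      = ([] : List ((Int × Int) × (Int × Int))) := rfl
  rw [PySem.List.foldl_congr_mem _ _
        (fun pairs p1 => (((PySem.List.enumerate t).filter (pvP p1)).map (fun p2 => (p1, p2))).foldl PySem.Set.add pairs)
        PySem.Set.empty hcongr, h0,
      pv_aq_outer _ (PySem.List.pairwise_lt_enumerate t 0) _ _
        (PySem.List.pairwise_lt_enumerate t 0) (by intro q hq; simp at hq) List.nodup_nil]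
  simp

lemma pv_enumerate_eq (t : List Int) :
    PySem.List.enumerate t = (List.range t.length).map (fun (k : ℕ) => ((k : Int), t.getD k 0)) := by
  rw [PySem.List.enumerate_eq_map_pyRange t 0, PySem.List.len_eq, PySem.List.pyRange_zero_natCast,
      List.map_map]
  apply List.map_congr_left
  intro k _
  simp [PySem.List.pyGetD_natCast]

lemma pv_ltdec (k j : ℕ) : (!((k : Int) == (j : Int) || decide ((j : Int) < (k : Int)))) = decide (k < j) := by
  have h1 : ((k : Int) = j) ↔ k = j := Nat.cast_inj
  have h2 : ((j : Int) < k) ↔ j < k := Nat.cast_lt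
  by_cases h : k < j
  · have h3 : ¬(k = j) := by omega
    have h4 : ¬(j < k) := by omega
    simp [h1, h2, h3, h4, h]
  · rcases Nat.lt_or_ge j k with h5 | h5
    · have h3 : ¬(k = j) := by omega
      simp [h1, h2, h3, h5, h]
    · have h3 : k = j := by omega
      simp [h1, h3, h]

lemma pvAQ_length (t : List Int) : (pvAQ t).length = pvCp t := by
  rw [pvAQ_eq_flatMap, List.length_flatMap, pv_enumerate_eq, List.map_map]
  simp only [Function.comp_def, List.length_map]
  have hstep : ∀ k ∈ List.range t.length,
      (((List.range t.length).map (fun (k : ℕ) => ((k : Int), t.getD k 0))).filter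
        (pvP ((k : Int), t.getD k 0))).length
      = ∑ j ∈ Finset.range t.length, if k < j ∧ pvAtk t k (t.getD k 0) j = true then 1 else 0 := by
    intro k _
    rw [← List.countP_eq_length_filter, List.countP_map]
    rw [List.countP_congr (q := fun j => decide (k < j ∧ pvAtk t k (t.getD k 0) j = true)) ?_,
        pv_countP_range]
    intro j _
    simp only [Function.comp_apply, pvP, pvAtk]
    rw [pv_ltdec k j, pv_beq_comm (t.getD k 0) (t.getD j 0)]
    by_cases h : k < j <;> simp [h]
  rw [List.map_congr_left hstep, pv_sum_map_range]
  rfl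

-- ---- B's loops compute pvCp / pvConfN ----

lemma pv_conf_eq (t : List Int) (c : ℕ) (v : Int) :
    pvConf t ((t.length : Int)) (c : Int) v = (pvConfN t c v : Int) := by
  unfold pvConf
  rw [PySem.List.pyRange_zero_natCast, List.foldl_map,
      PySem.List.foldl_ite_add_one
        (p := fun (k : ℕ) => (k : Int) ≠ (c : Int) ∧
          (PySem.List.pyGetD t (k : Int) 0 = v ∨ |(c : Int) - (k : Int)| = |v - PySem.List.pyGetD t (k : Int) 0|)),
      List.countP_congr (q := fun k => decide (k ≠ c ∧ pvAtk t c v k = true)) ?_,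
      pv_countP_range]
  · norm_num [pvConfN]
  · intro k _
    simp [pvAtk, PySem.List.pyGetD_natCast, ne_eq, Nat.cast_inj,
      Bool.or_eq_true, beq_iff_eq, decide_eq_true_eq]

lemma pv_total_eq (t : List Int) :
    (PySem.List.pyRange 0 (PySem.List.len t)).foldl (fun a i =>
      (PySem.List.pyRange (i + 1) (PySem.List.len t)).foldl (fun a j =>
        if PySem.List.pyGetD t i 0 = PySem.List.pyGetD t j 0 ∨
           |i - j| = |PySem.List.pyGetD t i 0 - PySem.List.pyGetD t j 0|
        then a + 1 else a) a) 0 = (pvCp t : Int) := by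
  rw [PySem.List.len_eq, PySem.List.pyRange_zero_natCast, List.foldl_map]
  have hstep : ∀ (acc : Int), ∀ k ∈ List.range t.length,
      (PySem.List.pyRange ((k : Int) + 1) (t.length : Int)).foldl (fun a j =>
        if PySem.List.pyGetD t (k : Int) 0 = PySem.List.pyGetD t j 0 ∨
           |(k : Int) - j| = |PySem.List.pyGetD t (k : Int) 0 - PySem.List.pyGetD t j 0|
        then a + 1 else a) acc
      = acc + ((∑ j ∈ Finset.range t.length, if k < j ∧ pvAtk t k (t.getD k 0) j = true then 1 else 0 : ℕ) : Int) := by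
    intro acc k hk
    rw [List.mem_range] at hk
    have hto : ((t.length : Int) - ((k : Int) + 1)).toNat = t.length - (k + 1) := by omega
    rw [PySem.List.pyRange_one, hto, List.foldl_map,
        PySem.List.foldl_ite_add_one
          (p := fun (m : ℕ) => PySem.List.pyGetD t (k : Int) 0 = PySem.List.pyGetD t ((k : Int) + 1 + (m : Int)) 0 ∨
            |(k : Int) - ((k : Int) + 1 + (m : Int))| = |PySem.List.pyGetD t (k : Int) 0 - PySem.List.pyGetD t ((k : Int) + 1 + (m : Int)) 0|)]
    congr 1
    have hsplit : t.length = (k + 1) + (t.length - (k + 1)) := by omega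
    have hcnt : (List.range t.length).countP (fun j => decide (k < j ∧ pvAtk t k (t.getD k 0) j = true))
        = (List.range (t.length - (k + 1))).countP
            (fun m => decide (k < (k + 1 + m) ∧ pvAtk t k (t.getD k 0) (k + 1 + m) = true)) := by
      conv_lhs => rw [show (List.range t.length) = List.range ((k + 1) + (t.length - (k + 1))) from by rw [← hsplit]]
      rw [List.range_add, List.countP_append, List.countP_map]
      have hz : (List.range (k + 1)).countP (fun j => decide (k < j ∧ pvAtk t k (t.getD k 0) j = true)) = 0 := by
        rw [List.countP_eq_zero]
        intro j hj
        rw [List.mem_range] at hj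
        simp only [decide_eq_true_eq, not_and]
        omega
      rw [hz, Nat.zero_add]
      apply List.countP_congr
      intro m _
      simp only [Function.comp_apply]
    rw [← pv_countP_range (p := fun j => k < j ∧ pvAtk t k (t.getD k 0) j = true), hcnt]
    congr 1
    apply List.countP_congr
    intro m _
    have hc : ((k : Int) + 1 + (m : Int)) = ((k + 1 + m : ℕ) : Int) := by push_cast; ring
    have h5 : k < k + 1 + m := by omega
    simp only [hc, PySem.List.pyGetD_natCast, pvAtk, decide_eq_true_eq, Bool.or_eq_true,
      beq_iff_eq, h5, true_and]
    constructor <;> rintro (h | h) <;> (first | exact Or.inl h.symm | exact Or.inr h)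
  rw [PySem.List.foldl_congr_mem _ _
        (fun (a : Int) (k : ℕ) => a + ((∑ j ∈ Finset.range t.length, if k < j ∧ pvAtk t k (t.getD k 0) j = true then 1 else 0 : ℕ) : Int)) 0 hstep,
      PySem.List.foldl_add, pv_sum_map_range_int]
  push_cast [pvCp]
  ring

-- ---- the incremental identity ----

lemma pvAtk_symm (t : List Int) (i j : ℕ) :
    pvAtk t i (t.getD i 0) j = pvAtk t j (t.getD j 0) i := by
  simp only [pvAtk]
  rw [abs_sub_comm ((i : Int)) ((j : Int)), abs_sub_comm (t.getD i 0) (t.getD j 0),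
      pv_beq_comm (t.getD j 0) (t.getD i 0)]

lemma pv_decomp (t : List Int) (c : ℕ) (hc : c < t.length) :
    pvCp t = pvS1 t c + pvConfN t c (t.getD c 0) := by
  unfold pvCp pvS1 pvConfN
  have hsplit : ∀ i j : ℕ, (if i < j ∧ pvAtk t i (t.getD i 0) j then (1 : ℕ) else 0)
      = (if i ≠ c ∧ j ≠ c ∧ i < j ∧ pvAtk t i (t.getD i 0) j then 1 else 0)
      + ((if j = c then (if i ≠ c ∧ i < j ∧ pvAtk t i (t.getD i 0) j then 1 else 0) else 0)
      + (if i = c then (if i < j ∧ pvAtk t i (t.getD i 0) j then 1 else 0) else 0)) := by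
    intro i j
    by_cases h1 : i = c <;> by_cases h2 : j = c <;> split_ifs <;> simp_all <;> omega
  calc ∑ i ∈ Finset.range t.length, ∑ j ∈ Finset.range t.length,
        (if i < j ∧ pvAtk t i (t.getD i 0) j then (1 : ℕ) else 0)
      = (∑ i ∈ Finset.range t.length, ∑ j ∈ Finset.range t.length,
          if i ≠ c ∧ j ≠ c ∧ i < j ∧ pvAtk t i (t.getD i 0) j then 1 else 0)
      + ((∑ i ∈ Finset.range t.length, ∑ j ∈ Finset.range t.length,
          if j = c then (if i ≠ c ∧ i < j ∧ pvAtk t i (t.getD i 0) j then 1 else 0) else 0)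
      + (∑ i ∈ Finset.range t.length, ∑ j ∈ Finset.range t.length,
          if i = c then (if i < j ∧ pvAtk t i (t.getD i 0) j then 1 else 0) else 0)) := by
        rw [← Finset.sum_add_distrib, ← Finset.sum_add_distrib]
        apply Finset.sum_congr rfl
        intro i _
        rw [← Finset.sum_add_distrib, ← Finset.sum_add_distrib]
        apply Finset.sum_congr rfl
        intro j _
        exact hsplit i j
    _ = (∑ i ∈ Finset.range t.length, ∑ j ∈ Finset.range t.length,
          if i ≠ c ∧ j ≠ c ∧ i < j ∧ pvAtk t i (t.getD i 0) j then 1 else 0)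
      + ∑ j ∈ Finset.range t.length, (if j ≠ c ∧ pvAtk t c (t.getD c 0) j then 1 else 0) := by
        congr 1
        have hS2 : (∑ i ∈ Finset.range t.length, ∑ j ∈ Finset.range t.length,
            if j = c then (if i ≠ c ∧ i < j ∧ pvAtk t i (t.getD i 0) j then 1 else 0) else 0)
            = ∑ i ∈ Finset.range t.length, (if i ≠ c ∧ i < c ∧ pvAtk t i (t.getD i 0) c then (1:ℕ) else 0) := by
          apply Finset.sum_congr rfl
          intro i _
          rw [Finset.sum_ite_eq' (Finset.range t.length) c
            (fun j => if i ≠ c ∧ i < j ∧ pvAtk t i (t.getD i 0) j then 1 else 0)]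
          simp [Finset.mem_range.mpr hc]
        have hS3 : (∑ i ∈ Finset.range t.length, ∑ j ∈ Finset.range t.length,
            if i = c then (if i < j ∧ pvAtk t i (t.getD i 0) j then 1 else 0) else 0)
            = ∑ j ∈ Finset.range t.length, (if c < j ∧ pvAtk t c (t.getD c 0) j then (1:ℕ) else 0) := by
          rw [Finset.sum_comm]
          apply Finset.sum_congr rfl
          intro j _
          rw [Finset.sum_ite_eq' (Finset.range t.length) c
            (fun i => if i < j ∧ pvAtk t i (t.getD i 0) j then 1 else 0)]
          simp [Finset.mem_range.mpr hc]
        rw [hS2, hS3, ← Finset.sum_add_distrib]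
        apply Finset.sum_congr rfl
        intro j _
        by_cases hjc : j = c
        · simp [hjc]
        · rcases Nat.lt_trichotomy j c with h | h | h
          · have hs := pvAtk_symm t j c
            have hnc : ¬ c < j := by omega
            rw [hs]
            simp [hjc, h, hnc]
          · exact absurd h hjc
          · have hnc : ¬ j < c := by omega
            simp [hjc, h, hnc]

lemma pv_getD_set_ne (t : List Int) (c j : ℕ) (r : Int) (h : j ≠ c) :
    (t.set c r)[j]?.getD 0 = t[j]?.getD 0 := by
  simp [List.getElem?_set, Ne.symm h]

lemma pv_confN_set (t : List Int) (c : ℕ) (r v : Int) :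
    pvConfN (t.set c r) c v = pvConfN t c v := by
  unfold pvConfN
  rw [List.length_set]
  apply Finset.sum_congr rfl
  intro j _
  by_cases hjc : j = c
  · simp [hjc]
  · simp [pvAtk, List.getD_eq_getElem?_getD, pv_getD_set_ne t c j r hjc, hjc]

lemma pv_S1_set (t : List Int) (c : ℕ) (r : Int) :
    pvS1 (t.set c r) c = pvS1 t c := by
  unfold pvS1
  rw [List.length_set]
  apply Finset.sum_congr rfl
  intro i _
  apply Finset.sum_congr rfl
  intro j _
  by_cases hic : i = c
  · simp [hic]
  · by_cases hjc : j = c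
    · simp [hjc]
    · simp [pvAtk, List.getD_eq_getElem?_getD, pv_getD_set_ne t c i r hic,
        pv_getD_set_ne t c j r hjc, hic, hjc]

lemma pv_move (t : List Int) (c : ℕ) (r : Int) (hc : c < t.length) :
    (pvCp (t.set c r) : Int) = (pvCp t : Int) - (pvConfN t c (t.getD c 0) : Int) + (pvConfN t c r : Int) := by
  have hlen : (t.set c r).length = t.length := List.length_set
  have h1 := pv_decomp t c hc
  have h2 := pv_decomp (t.set c r) c (by omega)
  have h3 : (t.set c r).getD c 0 = r := by
    simp [List.getD_eq_getElem?_getD, List.getElem?_set, hc]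
  rw [h3, pv_S1_set t c r, pv_confN_set t c r r] at h2
  omega

-- ---- A's matrix fold, entrywise ----

lemma pv_rowfold_len (t : List Int) (cN : ℕ) (rs : List ℕ) (M : List (List Int)) :
    (rs.foldl (pvStepRow t cN) M).length = M.length := by
  induction rs generalizing M with
  | nil => rfl
  | cons a rs ih =>
    simp only [List.foldl_cons, ih]
    unfold pvStepRow
    split <;> simp

lemma pv_rowfold_get (t : List Int) (cN : ℕ) (rs : List ℕ) (M : List (List Int))
    (hrs : ∀ x ∈ rs, x < M.length) (r : ℕ) :
    (rs.foldl (pvStepRow t cN) M).getD r []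
      = if r ∈ rs ∧ t.getD cN 0 ≠ (r : Int)
        then (M.getD r []).set cN (pvGval t cN r) else M.getD r [] := by
  induction rs generalizing M with
  | nil => simp
  | cons a rs ih =>
    have hlen : (pvStepRow t cN M a).length = M.length := by
      unfold pvStepRow; split <;> simp
    rw [List.foldl_cons, ih (pvStepRow t cN M a)
      (fun x hx => by rw [hlen]; exact hrs x (List.mem_cons_of_mem _ hx))]
    by_cases hra : r = a
    · subst hra
      have hrlen : r < M.length := hrs r List.mem_cons_self
      by_cases hcond : t.getD cN 0 ≠ (r : Int)
      · have hset : (pvStepRow t cN M r).getD r [] = (M.getD r []).set cN (pvGval t cN r) := by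
          unfold pvStepRow
          rw [if_pos hcond]
          simp [List.getD_eq_getElem?_getD, List.getElem?_set, hrlen]
        by_cases hrin : r ∈ rs
        · rw [if_pos ⟨hrin, hcond⟩, if_pos ⟨List.mem_cons_self, hcond⟩, hset, List.set_set]
        · rw [if_neg (by tauto), hset, if_pos ⟨List.mem_cons_self, hcond⟩]
      · have hskip : pvStepRow t cN M r = M := by unfold pvStepRow; rw [if_neg hcond]
        rw [hskip, if_neg (by tauto), if_neg (by tauto)]
    · have hg : (pvStepRow t cN M a).getD r [] = M.getD r [] := by
        unfold pvStepRow
        split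
        · simp [List.getD_eq_getElem?_getD, List.getElem?_set, Ne.symm hra]
        · rfl
      rw [hg]
      by_cases hrin : r ∈ rs ∧ t.getD cN 0 ≠ (r : Int)
      · rw [if_pos hrin, if_pos ⟨List.mem_cons_of_mem _ hrin.1, hrin.2⟩]
      · rw [if_neg hrin, if_neg (by simp only [List.mem_cons]; tauto)]

lemma pv_stepcol_len (t : List Int) (M : List (List Int)) (a : ℕ) :
    (pvStepCol t M a).length = M.length := pv_rowfold_len t a _ M

lemma pv_stepcol_rows (t : List Int) (M : List (List Int)) (a : ℕ)
    (hM : M.length = t.length) (hrows : ∀ row ∈ M, row.length = t.length) :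
    ∀ row ∈ pvStepCol t M a, row.length = t.length := by
  intro row hrow
  obtain ⟨k, hk, rfl⟩ := List.mem_iff_getElem.mp hrow
  have hk' : k < t.length := by
    rw [pv_stepcol_len, hM] at hk; exact hk
  have hkM : k < M.length := by omega
  have hgd : (pvStepCol t M a)[k] = (pvStepCol t M a).getD k [] := by
    simp [List.getD_eq_getElem?_getD, List.getElem?_eq_getElem hk]
  have hmem : M.getD k [] ∈ M := by
    have : M.getD k [] = M[k] := by
      simp [List.getD_eq_getElem?_getD, List.getElem?_eq_getElem hkM]
    rw [this]
    exact List.getElem_mem hkM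
  rw [hgd]
  unfold pvStepCol
  rw [pv_rowfold_get t a _ M (fun x hx => by rw [hM]; exact List.mem_range.mp hx) k]
  split
  · rw [List.length_set]
    exact hrows _ hmem
  · exact hrows _ hmem

lemma pv_colfold_len (t : List Int) (cs : List ℕ) (M : List (List Int)) :
    (cs.foldl (pvStepCol t) M).length = M.length := by
  induction cs generalizing M with
  | nil => rfl
  | cons a cs ih => simp only [List.foldl_cons, ih, pv_stepcol_len]

lemma pv_colfold_rows (t : List Int) (cs : List ℕ) (M : List (List Int))
    (hM : M.length = t.length) (hrows : ∀ row ∈ M, row.length = t.length) :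
    ∀ row ∈ cs.foldl (pvStepCol t) M, row.length = t.length := by
  induction cs generalizing M with
  | nil => exact hrows
  | cons a cs ih =>
    simp only [List.foldl_cons]
    exact ih (pvStepCol t M a) (by rw [pv_stepcol_len, hM]) (pv_stepcol_rows t M a hM hrows)

lemma pv_colfold_get (t : List Int) (cs : List ℕ) (M : List (List Int))
    (hM : M.length = t.length)
    (hrows : ∀ row ∈ M, row.length = t.length)
    (r c' : ℕ) (hr : r < t.length) (hc' : c' < t.length) :
    ((cs.foldl (pvStepCol t) M).getD r []).getD c' 0
      = if c' ∈ cs ∧ t.getD c' 0 ≠ (r : Int)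
        then pvGval t c' r else (M.getD r []).getD c' 0 := by
  induction cs generalizing M with
  | nil => simp
  | cons a cs ih =>
    rw [List.foldl_cons, ih (pvStepCol t M a) (by rw [pv_stepcol_len, hM])
        (pv_stepcol_rows t M a hM hrows)]
    have hrowchar : (pvStepCol t M a).getD r []
        = if t.getD a 0 ≠ (r : Int) then (M.getD r []).set a (pvGval t a r) else M.getD r [] := by
      unfold pvStepCol
      rw [pv_rowfold_get t a _ M (fun x hx => by rw [hM]; exact List.mem_range.mp hx) r]
      by_cases hcnd : t.getD a 0 ≠ (r : Int)
      · rw [if_pos ⟨List.mem_range.mpr hr, hcnd⟩, if_pos hcnd]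
      · rw [if_neg (by tauto), if_neg hcnd]
    by_cases hcc : c' ∈ cs ∧ t.getD c' 0 ≠ (r : Int)
    · rw [if_pos hcc, if_pos ⟨List.mem_cons_of_mem _ hcc.1, hcc.2⟩]
    · rw [if_neg hcc, hrowchar]
      have hrM : r < M.length := by omega
      have hmemrow : M.getD r [] ∈ M := by
        have : M.getD r [] = M[r] := by
          simp [List.getD_eq_getElem?_getD, List.getElem?_eq_getElem hrM]
        rw [this]
        exact List.getElem_mem hrM
      by_cases hca : c' = a
      · subst hca
        by_cases hcnd : t.getD c' 0 ≠ (r : Int)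
        · rw [if_pos hcnd, if_pos ⟨List.mem_cons_self, hcnd⟩]
          have hcrow : c' < (M.getD r []).length := by rw [hrows _ hmemrow]; exact hc'
          have hval : ∀ (l : List Int), c' < l.length → ∀ (v : Int), (l.set c' v).getD c' 0 = v := by
            intro l hl v
            simp [List.getD_eq_getElem?_getD, List.getElem?_set, hl]
          exact hval _ hcrow _
        · rw [if_neg hcnd, if_neg (by tauto)]
      · have hstep2 : (if t.getD a 0 ≠ (r : Int) then (M.getD r []).set a (pvGval t a r) else M.getD r []).getD c' 0
            = (M.getD r []).getD c' 0 := by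
          split
          · simp [List.getD_eq_getElem?_getD, List.getElem?_set, Ne.symm hca]
          · rfl
        rw [hstep2, if_neg (by simp only [List.mem_cons]; tauto)]

-- ---- the two ports as entrywise matrices ----

lemma pv_A_eq (t : List Int) :
    next_states_cost t = (List.range t.length).map (fun (r : ℕ) => (List.range t.length).map
      (fun (c : ℕ) => if t.getD c 0 = (r : Int) then -1 else pvGval t c r)) := by
  simp only [next_states_cost]
  rw [PySem.List.len_eq, PySem.List.pyRange_zero_natCast]
  simp only [List.foldl_map, List.map_map, Function.comp_def]
  have hstep : ∀ (M : List (List Int)), ∀ cN ∈ List.range t.length,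
      (List.range t.length).foldl (fun M (rN : ℕ) =>
        if PySem.List.pyGetD t (cN : Int) 0 ≠ (rN : Int) then
          pvSetMat M (rN : Int) (cN : Int) (PySem.Set.len (pvAQ (t.set ((cN : Int)).toNat ((rN : ℕ) : Int))))
        else M) M
      = pvStepCol t M cN := by
    intro M cN _
    unfold pvStepCol
    apply PySem.List.foldl_congr_mem
    intro acc rN _
    unfold pvStepRow pvSetMat pvGval
    simp [PySem.List.pyGetD_natCast, Int.toNat_natCast]
  rw [PySem.List.foldl_congr_mem _ _ (pvStepCol t) _ hstep]
  have hM0len : ((List.range t.length).map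
      (fun (_ : ℕ) => (List.range t.length).map (fun (_ : ℕ) => (-1 : Int)))).length = t.length := by
    simp
  have hM0rows : ∀ row ∈ (List.range t.length).map
      (fun (_ : ℕ) => (List.range t.length).map (fun (_ : ℕ) => (-1 : Int))), row.length = t.length := by
    intro row hrow
    obtain ⟨k, _, rfl⟩ := List.mem_map.mp hrow
    simp
  apply pv_mat_ext _ _ t.length
  · rw [pv_colfold_len]
    exact hM0len
  · simp
  · exact pv_colfold_rows t _ _ hM0len hM0rows
  · intro row hrow
    obtain ⟨k, _, rfl⟩ := List.mem_map.mp hrow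
    simp
  · intro r hr c hc
    rw [pv_colfold_get t (List.range t.length) _ hM0len hM0rows r c hr hc]
    have hbase : (((List.range t.length).map
          (fun (_ : ℕ) => (List.range t.length).map (fun (_ : ℕ) => (-1 : Int)))).getD r []).getD c 0 = -1 := by
      have h1 : ((List.range t.length).map
          (fun (_ : ℕ) => (List.range t.length).map (fun (_ : ℕ) => (-1 : Int)))).getD r []
          = (List.range t.length).map (fun (_ : ℕ) => (-1 : Int)) := by
        simp [List.getD_eq_getElem?_getD, List.getElem?_map, List.getElem?_range, hr]
      rw [h1]
      simp [List.getD_eq_getElem?_getD, List.getElem?_map, List.getElem?_range, hc]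
    rw [hbase]
    have hrhs : (((List.range t.length).map (fun (r : ℕ) => (List.range t.length).map
        (fun (c : ℕ) => if t.getD c 0 = (r : Int) then -1 else pvGval t c r))).getD r []).getD c 0
        = if t.getD c 0 = (r : Int) then -1 else pvGval t c r := by
      have h1 : ((List.range t.length).map (fun (r : ℕ) => (List.range t.length).map
          (fun (c : ℕ) => if t.getD c 0 = (r : Int) then -1 else pvGval t c r))).getD r []
          = (List.range t.length).map (fun (c : ℕ) => if t.getD c 0 = (r : Int) then -1 else pvGval t c r) := by
        simp [List.getD_eq_getElem?_getD, List.getElem?_map, List.getElem?_range, hr]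
      rw [h1]
      simp [List.getD_eq_getElem?_getD, List.getElem?_map, List.getElem?_range, hc]
    rw [hrhs]
    by_cases h : t.getD c 0 = (r : Int)
    · rw [if_neg (by tauto), if_pos h]
    · rw [if_pos ⟨List.mem_range.mpr hc, h⟩, if_neg h]

lemma pv_B_eq (t : List Int) :
    next_states_cost_alt t = (List.range t.length).map (fun (r : ℕ) => (List.range t.length).map
      (fun (c : ℕ) => if t.getD c 0 = (r : Int) then -1
        else (pvCp t : Int) - (pvConfN t c (t.getD c 0) : Int) + (pvConfN t c ((r : ℕ) : Int) : Int))) := by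
  simp only [next_states_cost_alt]
  rw [pv_total_eq]
  rw [PySem.List.len_eq, PySem.List.pyRange_zero_natCast]
  simp only [List.map_map, Function.comp_def]
  apply List.map_congr_left
  intro r hr
  apply List.map_congr_left
  intro c hc
  rw [List.mem_range] at hr hc
  have hbase : PySem.List.pyGetD ((List.range t.length).map (fun (k : ℕ) =>
      (pvCp t : Int) - pvConf t ((t.length : Int)) ((k : ℕ) : Int) (PySem.List.pyGetD t ((k : ℕ) : Int) 0))) ((c : ℕ) : Int) 0
      = (pvCp t : Int) - pvConf t ((t.length : Int)) ((c : ℕ) : Int) (PySem.List.pyGetD t ((c : ℕ) : Int) 0) := by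
    rw [PySem.List.pyGetD_natCast]
    simp [List.getD_eq_getElem?_getD, List.getElem?_map, List.getElem?_range, hc]
  rw [hbase, PySem.List.pyGetD_natCast, pv_conf_eq, pv_conf_eq]

-- ===== VERDICT (by name: the statement is the Claim_ definition above) =====
theorem next_states_cost_spec : Claim_equal_next_states_cost := by
  intro state _
  unfold Spec_next_states_cost
  rw [pv_A_eq, pv_B_eq]
  apply List.map_congr_left
  intro r hr
  apply List.map_congr_left
  intro c hc
  rw [List.mem_range] at hr hc
  by_cases h : state.getD c 0 = (r : Int)
  · rw [if_pos h, if_pos h]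
  · rw [if_neg h, if_neg h]
    have h1 : pvGval state c r = (pvCp (state.set c ((r : ℕ) : Int)) : Int) := by
      simp [pvGval, PySem.Set.len, PySem.List.len_eq, pvAQ_length]
    rw [h1, pv_move state c ((r : ℕ) : Int) hc]
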